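-- pv_equiv track=rewrite | github.com/32Fire32/anki-vector-enhance | vector_personality/perception/object_detector.py | detection_summary
-- ===== SOURCE A (Python) =====
-- from typing import List, Dict, Any, Optional, Tuple
--
-- def detection_summary(detections: List[Dict[str, Any]]) -> str:
--     """
--     Create human-readable summary of detections
--
--     Args:
--         detections: List of detections
--
--     Returns:
--         Summary string
--     """
--     if not detections:
--         return "No objects detected"
--
--     # Count objects by class
--     class_counts = {}
--     for detection in detections:
--         class_name = detection["class"]
--         class_counts[class_name] = class_counts.get(class_name, 0) + 1
--
--     # Build summary
--     parts = []
--     for class_name, count in sorted(class_counts.items()):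
--         if count == 1:
--             parts.append(f"1 {class_name}")
--         else:
--             parts.append(f"{count} {class_name}s")
--
--     return "Detected: " + ", ".join(parts)
-- ===== SOURCE B (Python) =====
-- from itertools import groupby
--
-- def detection_summary(detections):
--     """
--     Create human-readable summary of detections (sort-and-group implementation).
--     """
--     if not detections:
--         return "No objects detected"
--     names = sorted(d["class"] for d in detections)
--     parts = []
--     for name, grp in groupby(names):
--         n = len(list(grp))
--         parts.append(f"{n} {name}" if n == 1 else f"{n} {name}s")
--     return "Detected: " + ", ".join(parts)
-- ===== Notes on version B (the rewrite author's own statement) =====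
-- stated objective: alternative
-- what changed: Replaces A's count-dictionary pass plus sorted(items) with building the list of class names, sorting it, and walking it with itertools.groupby so each consecutive run yields one part; no count dict is maintained.
import Mathlib
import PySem

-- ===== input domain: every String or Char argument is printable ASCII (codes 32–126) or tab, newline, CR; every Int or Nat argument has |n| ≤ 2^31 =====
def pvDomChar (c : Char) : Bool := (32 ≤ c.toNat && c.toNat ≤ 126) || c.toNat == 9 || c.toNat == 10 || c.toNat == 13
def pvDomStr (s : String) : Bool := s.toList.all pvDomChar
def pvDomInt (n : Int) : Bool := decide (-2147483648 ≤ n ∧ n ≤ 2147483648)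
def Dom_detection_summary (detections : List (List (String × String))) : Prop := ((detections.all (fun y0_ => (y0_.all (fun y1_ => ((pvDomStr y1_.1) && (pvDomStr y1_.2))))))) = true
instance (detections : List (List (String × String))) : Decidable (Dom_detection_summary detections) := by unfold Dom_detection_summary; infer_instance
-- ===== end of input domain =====

-- B replaces A's count-dictionary pass by "sort the class names, then group consecutive equal
-- names" (itertools.groupby), a different decomposition of the same summary; return values only.

-- ===== PORT A =====
-- A, step for step: empty guard; counting dict built by d[name] = d.get(name,0)+1; parts built
-- by appending to a list over sorted(items) (tuple order = sorted2 on (fst, snd)); f-strings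
-- ported as PySem.Str.join "" of the pieces.
def detection_summary (detections : List (List (String × String))) : String :=
  if detections = [] then "No objects detected"
  else
    let class_counts : PySem.Dict String Int :=
      detections.foldl (fun d det =>
        let class_name := (List.lookup "class" det).getD ""
        d.insert class_name (d.getD class_name 0 + 1)) PySem.Dict.empty
    let parts : List String :=
      (PySem.List.sorted2 class_counts.items Prod.fst Prod.snd).foldl
        (fun parts p =>
          if p.2 = 1 then parts ++ [PySem.Str.join "" ["1 ", p.1]]
          else parts ++ [PySem.Str.join "" [PySem.Int.toStr p.2, " ", p.1, "s"]]) []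
    PySem.Str.join "" ["Detected: ", PySem.Str.join ", " parts]

-- ===== PORT B =====
-- itertools.groupby over the sorted name list: consecutive runs, carried as (current name, run length)
def pvRunsFrom (cur : String) (n : Int) : List String → List (String × Int)
  | [] => [(cur, n)]
  | x :: xs => if x = cur then pvRunsFrom cur (n + 1) xs else (cur, n) :: pvRunsFrom x 1 xs

def detection_summary_alt (detections : List (List (String × String))) : String :=
  if detections = [] then "No objects detected"
  else
    let names : List String :=
      PySem.List.sorted (detections.map (fun det => (List.lookup "class" det).getD ""))
        (fun x => x) false
    let groups : List (String × Int) :=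
      match names with
      | [] => []
      | x :: xs => pvRunsFrom x 1 xs
    let parts : List String := groups.map (fun p =>
      if p.2 = 1 then PySem.Str.join "" [PySem.Int.toStr p.2, " ", p.1]
      else PySem.Str.join "" [PySem.Int.toStr p.2, " ", p.1, "s"])
    PySem.Str.join "" ["Detected: ", PySem.Str.join ", " parts]

-- ===== PRECONDITION & SPEC =====
-- Pre_ excludes exactly the inputs where Python A raises KeyError: a detection without a "class" key.
def Pre_detection_summary (detections : List (List (String × String))) : Prop :=
  ∀ det ∈ detections, "class" ∈ det.map Prod.fst
instance (detections : List (List (String × String))) : Decidable (Pre_detection_summary detections) := by unfold Pre_detection_summary; infer_instance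
def pvWitness_detection_summary : (List (List (String × String))) :=
  [[("class", "cup")], [("class", "dog")], [("class", "cup")]]

def Spec_detection_summary (detections : List (List (String × String))) (out : String) : Prop := out = detection_summary_alt detections
instance (detections : List (List (String × String))) (out : String) : Decidable (Spec_detection_summary detections out) := by unfold Spec_detection_summary; infer_instance

-- ===== CLAIM (what is proved, stated in full; the proofs are below) =====
def Claim_equal_detection_summary : Prop := ∀ (detections : List (List (String × String))), Dom_detection_summary detections → Pre_detection_summary detections → Spec_detection_summary detections (detection_summary detections)

-- ===== LEMMAS AND PROOFS =====

def pvRle : List String → List (String × Int)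
  | [] => []
  | x :: xs =>
    match pvRle xs with
    | [] => [(x, 1)]
    | (y, n) :: t => if x = y then (x, n + 1) :: t else (x, 1) :: (y, n) :: t

theorem pvRunsFrom_eq_rle (l : List String) : ∀ (cur : String) (n : Int),
    ∃ m t, pvRle (cur :: l) = (cur, m) :: t ∧ pvRunsFrom cur n l = (cur, m + n - 1) :: t := by
  induction l with
  | nil =>
    intro cur n
    refine ⟨1, [], rfl, ?_⟩
    have e : (1 : Int) + n - 1 = n := by omega
    simp only [pvRunsFrom, e]
  | cons x xs ih =>
    intro cur n
    by_cases hx : x = cur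
    · subst hx
      obtain ⟨m, t, h1, h2⟩ := ih x (n + 1)
      refine ⟨m + 1, t, ?_, ?_⟩
      · simp only [pvRle] at h1 ⊢
        rw [h1]
        simp
      · have e : m + (n + 1) - 1 = m + 1 + n - 1 := by omega
        simp only [pvRunsFrom, reduceIte]
        rw [h2, e]
    · obtain ⟨m, t, h1, h2⟩ := ih x 1
      refine ⟨1, (x, m) :: t, ?_, ?_⟩
      · simp only [pvRle] at h1 ⊢
        rw [h1]
        simp [Ne.symm hx]
      · have e : m + 1 - 1 = m := by omega
        have e2 : (1 : Int) + n - 1 = n := by omega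
        simp only [pvRunsFrom, if_neg hx]
        rw [h2, e, e2]

theorem pvRle_spec (l : List String) (h : l.Pairwise (· ≤ ·)) :
    ∃ K : List String, K.Pairwise (· < ·) ∧ (∀ k, k ∈ K ↔ k ∈ l) ∧ K.head? = l.head? ∧
      pvRle l = K.map (fun k => (k, (l.count k : Int))) := by
  induction l with
  | nil => exact ⟨[], by simp, by simp, rfl, rfl⟩
  | cons x xs ih =>
    obtain ⟨hx, hxs⟩ := List.pairwise_cons.mp h
    obtain ⟨K, hK, hmem, hhead, heq⟩ := ih hxs
    cases xs with
    | nil =>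
      refine ⟨[x], by simp, by simp, rfl, ?_⟩
      simp [pvRle]
    | cons y ys =>
      have hKy : ∃ K', K = y :: K' := by
        cases K with
        | nil => simp at hhead
        | cons a K' => simp at hhead; exact ⟨K', by rw [hhead]⟩
      obtain ⟨K', rfl⟩ := hKy
      have hygt : ∀ k ∈ K', y < k := (List.pairwise_cons.mp hK).1
      by_cases hxy : x = y
      · subst hxy
        refine ⟨x :: K', hK, ?_, rfl, ?_⟩
        · intro k; constructor
          · intro hk; rcases List.mem_cons.mp hk with rfl | hk
            · simp
            · simp [((hmem k).mp (by simp [hk]) : k ∈ x :: ys)]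
          · intro hk
            rcases List.mem_cons.mp hk with rfl | hk
            · simp
            · have := (hmem k).mpr hk; simpa using this
        · simp only [pvRle] at heq ⊢
          rw [heq]
          simp only [List.map_cons, reduceIte]
          have hcx : ((List.count x (x :: ys) : Int) + 1) = (List.count x (x :: x :: ys) : Int) := by
            simp
          rw [hcx]
          congr 1
          apply List.map_congr_left
          intro k hk
          have hne : k ≠ x := ne_of_gt (hygt k hk)
          simp [Ne.symm hne]
      · have hxy' : x < y := lt_of_le_of_ne (hx y (by simp)) hxy
        have hxnotin : x ∉ y :: ys := by
          intro hmemx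
          have := (hmem x).mpr hmemx
          rcases List.mem_cons.mp this with rfl | hk
          · exact hxy rfl
          · exact lt_asymm hxy' (hygt x hk)
        refine ⟨x :: y :: K', ?_, ?_, rfl, ?_⟩
        · refine List.pairwise_cons.mpr ⟨?_, hK⟩
          intro k hk
          rcases List.mem_cons.mp hk with rfl | hk
          · exact hxy'
          · exact lt_trans hxy' (hygt k hk)
        · intro k
          constructor
          · intro hk
            rcases List.mem_cons.mp hk with rfl | hk
            · simp
            · have := (hmem k).mp hk
              simp [this]
          · intro hk
            rcases List.mem_cons.mp hk with rfl | hk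
            · simp
            · simp [(hmem k).mpr hk]
        · simp only [pvRle] at heq ⊢
          rw [heq]
          simp only [List.map_cons, if_neg hxy]
          have hcx : (List.count x (x :: y :: ys) : Int) = 1 := by
            simp [List.count_eq_zero.mpr hxnotin]
          rw [hcx]
          congr 1
          have : ∀ k ∈ y :: K', k ≠ x := by
            intro k hk
            rcases List.mem_cons.mp hk with rfl | hk
            · exact Ne.symm hxy
            · exact ne_of_gt (lt_trans hxy' (hygt k hk))
          congr 1
          · congr 1
            simp [hxy]
          · apply List.map_congr_left
            intro k hk
            have hkx := this k (by simp [hk])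
            simp [Ne.symm hkx]

theorem pvInsertBy_congr {α : Type} (b1 b2 : α → α → Bool) (x : α) (l : List α)
    (h : ∀ y ∈ l, b1 x y = b2 x y) :
    PySem.List.insertBy b1 x l = PySem.List.insertBy b2 x l := by
  induction l with
  | nil => rfl
  | cons y ys ih =>
    simp only [PySem.List.insertBy]
    rw [h y (by simp)]
    split
    · rfl
    · rw [ih (fun z hz => h z (by simp [hz]))]

theorem pvFoldl_insertBy_congr {α : Type} (b1 b2 : α → α → Bool) :
    ∀ (xs acc : List α),
    (∀ x ∈ xs, ∀ y, y ∈ acc ∨ y ∈ xs → b1 x y = b2 x y) →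
    xs.foldl (fun a x => PySem.List.insertBy b1 x a) acc
      = xs.foldl (fun a x => PySem.List.insertBy b2 x a) acc := by
  intro xs
  induction xs with
  | nil => intro acc h; rfl
  | cons x xs ih =>
    intro acc h
    simp only [List.foldl_cons]
    rw [pvInsertBy_congr b1 b2 x acc (fun y hy => h x (by simp) y (Or.inl hy))]
    exact ih _ (fun z hz y hy => h z (by simp [hz]) y (by
      rcases hy with hy | hy
      · rcases (PySem.List.mem_insertBy b2 x y acc).mp hy with rfl | hy
        · exact Or.inr (by simp)
        · exact Or.inl hy
      · exact Or.inr (by simp [hy])))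

theorem pvSorted2_eq_sorted (xs : List (String × Int)) (h : (xs.map Prod.fst).Nodup) :
    PySem.List.sorted2 xs Prod.fst Prod.snd false = PySem.List.sorted xs Prod.fst false := by
  simp only [PySem.List.sorted2, PySem.List.sorted, if_neg (by simp : ¬ (false = true))]
  apply pvFoldl_insertBy_congr
  intro a ha y hy
  have hy' : y ∈ xs := by
    rcases hy with hy | hy
    · cases hy
    · exact hy
  by_cases hf : a.1 = y.1
  · have : a = y := List.inj_on_of_nodup_map h ha hy' hf
    subst this
    simp
  · rcases lt_trichotomy a.1 y.1 with hlt | heq | hgt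
    · simp [hlt]
    · exact absurd heq hf
    · simp [hgt, not_lt_of_gt hgt]

theorem pvJoin_one (p : String) :
    PySem.Str.join "" ["1 ", p] = PySem.Str.join "" [PySem.Int.toStr 1, " ", p] := by
  have h : PySem.Int.toChars 1 = ['1'] := by decide
  simp [PySem.Str.join, PySem.Chars.join, List.intercalate, PySem.Int.toStr, h,
    -String.ofList_append]

theorem detection_summary_eq (detections : List (List (String × String))) :
    detection_summary detections = detection_summary_alt detections := by
  by_cases hd : detections = []
  · subst hd; rfl
  · -- abbreviations
    let g : List (String × String) → String := fun det => (List.lookup "class" det).getD ""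
    let ns : List String := detections.map g
    -- A's counting loop is Dict.counter ns
    have hc : detections.foldl (fun d det =>
        let class_name := (List.lookup "class" det).getD ""
        d.insert class_name (d.getD class_name 0 + 1)) PySem.Dict.empty
        = PySem.Dict.counter ns := by
      simp only [ns, g, PySem.Dict.counter, List.foldl_map]
      rfl
    have hkeys : (PySem.Dict.counter ns).keys = PySem.List.dedup ns := by
      have h1 : (PySem.Dict.counter ns).keys
          = PySem.Set.update (PySem.Dict.empty : PySem.Dict String Int).keys ns :=
        PySem.Dict.keys_foldl_modify ns 0 (fun _ _ v => v + 1) _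
      rw [h1, PySem.List.dedup_eq_ofList]
      rfl
    have hnd : (PySem.Dict.counter ns).keys.Nodup := by
      rw [hkeys]; exact PySem.List.nodup_dedup ns
    have hitems : (PySem.Dict.counter ns).items
        = (PySem.List.dedup ns).map (fun k => (k, (List.count k ns : Int))) := by
      rw [PySem.Dict.items_eq_map_keys _ hnd 0, hkeys]
      apply List.map_congr_left
      intro k _
      rw [PySem.Dict.getD_counter]
    have hns : ns ≠ [] := by
      simp only [ns]
      exact fun h => hd (List.map_eq_nil_iff.mp h)
    obtain ⟨x, xs, hS⟩ : ∃ x xs, PySem.List.sorted ns (fun x => x) false = x :: xs := by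
      cases hSn : PySem.List.sorted ns (fun x => x) false with
      | nil => exact absurd ((PySem.List.sorted_eq_nil_iff ns _ false).mp hSn) hns
      | cons a l => exact ⟨a, l, rfl⟩
    have hpw : (x :: xs).Pairwise (· ≤ ·) := by
      have := PySem.List.sorted_pairwise ns (fun x => x)
      rw [hS] at this
      exact this
    obtain ⟨K, hKpw, hmemK, _, heqK⟩ := pvRle_spec (x :: xs) hpw
    have hcnt : ∀ k, List.count k (x :: xs) = List.count k ns := by
      intro k
      have := (PySem.List.sorted_perm ns (fun x => x) false).count_eq k
      rw [hS] at this
      exact this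
    have heqK' : pvRle (x :: xs) = K.map (fun k => (k, (List.count k ns : Int))) := by
      rw [heqK]
      apply List.map_congr_left
      intro k _
      rw [hcnt k]
    have hKnd : K.Nodup := hKpw.imp (fun h => ne_of_lt h)
    have hperm : K.Perm (PySem.List.dedup ns) := by
      rw [List.perm_ext_iff_of_nodup hKnd (PySem.List.nodup_dedup ns)]
      intro a
      rw [hmemK a, PySem.List.mem_dedup]
      constructor
      · intro ha
        have := (PySem.List.mem_sorted (x := a) (xs := ns) (key := fun x => x) (rev := false)).mp
        rw [hS] at this
        exact this ha
      · intro ha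
        have := (PySem.List.mem_sorted (x := a) (xs := ns) (key := fun x => x) (rev := false)).mpr ha
        rw [hS] at this
        exact this
    have hmapfst : ((PySem.Dict.counter ns).items.map Prod.fst).Nodup := by
      rw [hitems, List.map_map]
      have hid : (Prod.fst ∘ fun k => (k, (List.count k ns : Int))) = id := rfl
      rw [hid, List.map_id]
      exact PySem.List.nodup_dedup ns
    have hruns : pvRunsFrom x 1 xs = pvRle (x :: xs) := by
      obtain ⟨m, t, h1, h2⟩ := pvRunsFrom_eq_rle xs x 1
      have e : m + 1 - 1 = m := by omega
      rw [h2, e, h1]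
    have hs2 : PySem.List.sorted2 (PySem.Dict.counter ns).items Prod.fst Prod.snd false
        = pvRle (x :: xs) := by
      rw [pvSorted2_eq_sorted _ hmapfst]
      apply PySem.List.sorted_eq_of_perm_of_pairwise_lt
      · rw [heqK', hitems]
        exact hperm.map _
      · rw [heqK']
        exact List.pairwise_map.mpr (hKpw.imp (fun h => h))
    -- assemble
    simp only [detection_summary, detection_summary_alt, if_neg hd]
    rw [hc, hs2, ← hruns, hS]
    refine congrArg (fun z => PySem.Str.join "" ["Detected: ", PySem.Str.join ", " z]) ?_
    rw [show (fun (parts : List String) (p : String × Int) =>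
          if p.2 = 1 then parts ++ [PySem.Str.join "" ["1 ", p.1]]
          else parts ++ [PySem.Str.join "" [PySem.Int.toStr p.2, " ", p.1, "s"]])
        = (fun (parts : List String) (p : String × Int) =>
          parts ++ [if p.2 = 1 then PySem.Str.join "" ["1 ", p.1]
            else PySem.Str.join "" [PySem.Int.toStr p.2, " ", p.1, "s"]]) from by
          funext parts p; split <;> rfl]
    rw [PySem.List.foldl_append_singleton_eq_map]
    rw [List.nil_append]
    exact List.map_congr_left (fun p _ => by
      by_cases hp : p.2 = 1
      · rw [if_pos hp, if_pos hp, hp]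
        exact pvJoin_one p.1
      · rw [if_neg hp, if_neg hp])

-- ===== VERDICT (by name: the statement is the Claim_ definition above) =====
theorem detection_summary_spec : Claim_equal_detection_summary := by
  intro detections _ _
  exact detection_summary_eq detections
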